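-- pv_equiv track=rewrite | github.com/Marciland/advent-of-code | day2.py | find_fewest_necessary
-- ===== SOURCE A (Python) =====
-- def find_fewest_necessary(game_sets: list[dict]) -> dict:
--     '''returns the fewest necessary for a game (game_sets of a game)'''
--     highest_red = 0
--     highest_green = 0
--     highest_blue = 0
--     for game_set in game_sets:
--         for color, amount in game_set.items():
--             if color == 'red' and highest_red < amount:
--                 highest_red = amount
--             if color == 'green' and highest_green < amount:
--                 highest_green = amount
--             if color == 'blue' and highest_blue < amount:
--                 highest_blue = amount
--     return {'red': highest_red, 'green': highest_green, 'blue': highest_blue}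
-- ===== SOURCE B (Python) =====
-- def find_fewest_necessary(game_sets: list[dict]) -> dict:
--     '''returns the fewest necessary for a game (game_sets of a game)'''
--     return {
--         color: max([0, *(amount
--                          for game_set in game_sets
--                          for c, amount in game_set.items()
--                          if c == color)])
--         for color in ('red', 'green', 'blue')
--     }
-- ===== Notes on version B (the rewrite author's own statement) =====
-- stated objective: simpler
-- what changed: Replaces A's single set-major pass with three mutable accumulators and per-entry branch dispatch by a color-major dict comprehension: for each of the three color names, the maximum (seeded with 0) over all matching amounts across all sets.
import Mathlib
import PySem

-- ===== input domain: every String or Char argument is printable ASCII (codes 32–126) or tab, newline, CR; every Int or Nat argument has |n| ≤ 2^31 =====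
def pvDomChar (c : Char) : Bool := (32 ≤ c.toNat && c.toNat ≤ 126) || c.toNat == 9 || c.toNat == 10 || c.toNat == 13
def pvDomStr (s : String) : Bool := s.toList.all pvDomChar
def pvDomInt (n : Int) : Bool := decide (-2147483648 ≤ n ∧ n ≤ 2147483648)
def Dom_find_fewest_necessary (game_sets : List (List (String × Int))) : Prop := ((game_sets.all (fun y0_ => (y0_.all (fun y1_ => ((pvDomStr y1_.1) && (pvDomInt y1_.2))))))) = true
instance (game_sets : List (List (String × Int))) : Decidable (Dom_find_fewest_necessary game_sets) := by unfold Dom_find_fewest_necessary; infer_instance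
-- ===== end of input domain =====

-- ===== PORT A =====
-- B changes the decomposition: three color-major max-reductions instead of A's
-- single set-major pass with three accumulators ("simpler"/alternative decomposition).
-- Step of A's inner loop: the three independent `if` updates on (red, green, blue).
def pvStepA (st : Int × Int × Int) (p : String × Int) : Int × Int × Int :=
  let r := if p.1 = "red" ∧ st.1 < p.2 then p.2 else st.1
  let g := if p.1 = "green" ∧ st.2.1 < p.2 then p.2 else st.2.1
  let b := if p.1 = "blue" ∧ st.2.2 < p.2 then p.2 else st.2.2
  (r, g, b)

def find_fewest_necessary (game_sets : List (List (String × Int))) : List (String × Int) :=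
  let st := game_sets.foldl (fun st game_set => game_set.foldl pvStepA st) (0, 0, 0)
  [("red", st.1), ("green", st.2.1), ("blue", st.2.2)]

-- ===== PORT B =====
-- max([0, *amounts]) for one color: maximum of the 0-seeded list of matching amounts.
def pvColorMax (game_sets : List (List (String × Int))) (color : String) : Int :=
  (game_sets.flatMap (fun game_set =>
      (game_set.filter (fun p => p.1 = color)).map Prod.snd)).foldl max 0

def find_fewest_necessary_alt (game_sets : List (List (String × Int))) : List (String × Int) :=
  ["red", "green", "blue"].map (fun color => (color, pvColorMax game_sets color))

-- ===== PRECONDITION & SPEC =====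
def Spec_find_fewest_necessary (game_sets : List (List (String × Int))) (out : List (String × Int)) : Prop := out = find_fewest_necessary_alt game_sets
instance (game_sets : List (List (String × Int))) (out : List (String × Int)) : Decidable (Spec_find_fewest_necessary game_sets out) := by unfold Spec_find_fewest_necessary; infer_instance

-- ===== CLAIM (what is proved, stated in full; the proofs are below) =====
def Claim_equal_find_fewest_necessary : Prop := ∀ (game_sets : List (List (String × Int))), Dom_find_fewest_necessary game_sets → Spec_find_fewest_necessary game_sets (find_fewest_necessary game_sets)

-- ===== LEMMAS AND PROOFS =====

-- Per-color step of B, unfolded over unfiltered entries.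
def pvStepC (color : String) (a : Int) (p : String × Int) : Int :=
  if p.1 = color then max a p.2 else a

theorem pvStepA_eq (st : Int × Int × Int) (p : String × Int) :
    pvStepA st p = (pvStepC "red" st.1 p, pvStepC "green" st.2.1 p, pvStepC "blue" st.2.2 p) := by
  simp only [pvStepA, pvStepC]
  refine Prod.ext ?_ (Prod.ext ?_ ?_) <;> simp only <;>
    by_cases h : p.1 = "red" <;> by_cases h2 : p.1 = "green" <;> by_cases h3 : p.1 = "blue" <;>
      simp [h, h2, h3, max_def] <;> omega

theorem foldl_stepA_inner (l : List (String × Int)) (st : Int × Int × Int) :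
    l.foldl pvStepA st =
      (l.foldl (pvStepC "red") st.1, l.foldl (pvStepC "green") st.2.1,
       l.foldl (pvStepC "blue") st.2.2) := by
  induction l generalizing st with
  | nil => rfl
  | cons p t ih => simp [List.foldl_cons, ih, pvStepA_eq]

theorem foldl_stepA_outer (gs : List (List (String × Int))) (st : Int × Int × Int) :
    gs.foldl (fun st game_set => game_set.foldl pvStepA st) st =
      (gs.foldl (fun a g => g.foldl (pvStepC "red") a) st.1,
       gs.foldl (fun a g => g.foldl (pvStepC "green") a) st.2.1,
       gs.foldl (fun a g => g.foldl (pvStepC "blue") a) st.2.2) := by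
  induction gs generalizing st with
  | nil => rfl
  | cons g t ih => rw [List.foldl_cons, List.foldl_cons, List.foldl_cons, List.foldl_cons,
      foldl_stepA_inner, ih]

theorem pvInner_eq (g : List (String × Int)) (a : Int) (c : String) :
    ((g.filter (fun p => p.1 = c)).map Prod.snd).foldl max a = g.foldl (pvStepC c) a := by
  rw [List.foldl_map, List.foldl_filter]
  congr 1
  funext a p
  simp only [pvStepC]
  split <;> simp_all

theorem pvColorMax_eq (gs : List (List (String × Int))) (c : String) :
    pvColorMax gs c = gs.foldl (fun a g => g.foldl (pvStepC c) a) 0 := by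
  unfold pvColorMax
  rw [List.foldl_flatMap]
  simp only [pvInner_eq]

-- ===== VERDICT (by name: the statement is the Claim_ definition above) =====
theorem find_fewest_necessary_spec : Claim_equal_find_fewest_necessary := by
  intro gs _
  unfold Spec_find_fewest_necessary find_fewest_necessary find_fewest_necessary_alt
  simp only [foldl_stepA_outer, pvColorMax_eq, List.map_cons, List.map_nil]
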